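-- pv_equiv track=rewrite | github.com/3duardoambrosio-bit/trendify-f1 | synapse/creative_buildsheet.py | _build_primary_text
-- ===== SOURCE A (Python) =====
-- from typing import Any, Dict, List, Optional
--
-- def _safe_str(x: Any, default: str = "") -> str:
--     if x is None:
--         return default
--     s = str(x).strip()
--     return s if s else default
--
-- def _build_primary_text(structure: List[Dict[str, Any]], offer: str) -> str:
--     # compacta HOOK + PROBLEM + OFFER
--     hook = ""
--     prob = ""
--     for b in structure or []:
--         beat = _safe_str(b.get("beat", "")).upper()
--         scr = _safe_str(b.get("script", ""))
--         if beat == "HOOK" and not hook: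
--             hook = scr
--         if beat == "PROBLEM" and not prob:
--             prob = scr
--     chunks = [c for c in [hook, prob, _safe_str(offer)] if c]
--     return " ".join(chunks).strip()
-- ===== SOURCE B (Python) =====
-- from typing import Any, Dict, List
--
--
-- def _safe_str(x: Any, default: str = "") -> str:
--     if x is None:
--         return default
--     s = str(x).strip()
--     return s if s else default
--
--
-- def _first_script(structure: List[Dict[str, Any]], beat_name: str) -> str:
--     """First non-empty (stripped) script among blocks whose beat is beat_name."""
--     return next((s for b in structure
--                  if _safe_str(b.get("beat", "")).upper() == beat_name
--                  for s in [_safe_str(b.get("script", ""))] if s), "")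
--
--
-- def _build_primary_text(structure: List[Dict[str, Any]], offer: str) -> str:
--     hook = _first_script(structure or [], "HOOK")
--     prob = _first_script(structure or [], "PROBLEM")
--     chunks = [c for c in [hook, prob, _safe_str(offer)] if c]
--     return " ".join(chunks).strip()
-- ===== Notes on version B (the rewrite author's own statement) =====
-- stated objective: simpler
-- what changed: Replaces the single loop threading two mutable hook/prob slots with two independent first-match scans (next over a generator) for HOOK and PROBLEM.
import Mathlib
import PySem

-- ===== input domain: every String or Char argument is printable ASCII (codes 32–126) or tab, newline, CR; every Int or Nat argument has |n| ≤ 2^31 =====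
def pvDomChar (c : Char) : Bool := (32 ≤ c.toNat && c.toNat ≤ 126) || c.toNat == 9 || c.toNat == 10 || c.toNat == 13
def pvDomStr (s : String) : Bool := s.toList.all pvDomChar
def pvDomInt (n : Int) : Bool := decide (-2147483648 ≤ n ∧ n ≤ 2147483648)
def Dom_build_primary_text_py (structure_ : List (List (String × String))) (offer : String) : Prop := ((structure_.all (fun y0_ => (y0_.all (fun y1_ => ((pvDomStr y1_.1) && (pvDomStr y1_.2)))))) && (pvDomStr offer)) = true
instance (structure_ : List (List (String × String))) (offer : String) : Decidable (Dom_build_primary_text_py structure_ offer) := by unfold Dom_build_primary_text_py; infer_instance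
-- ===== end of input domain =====

-- B replaces A's single loop threading two mutable hook/prob slots with two independent
-- first-match scans for HOOK and PROBLEM (objective: simpler decomposition; same cost).


-- shared helper: Python's _safe_str (x is always a string here, so the None branch is vacuous)
def pvSafeStr (x : String) (default : String) : String :=
  let s := PySem.Str.strip x
  if s = "" then default else s

-- ===== PORT A =====
def build_primary_text_py (structure_ : List (List (String × String))) (offer : String) : String :=
  let st := structure_.foldl (fun (st : String × String) b =>
    let beat := PySem.Str.upper (pvSafeStr ((PySem.Dict.mk b).getD "beat" "") "")
    let scr := pvSafeStr ((PySem.Dict.mk b).getD "script" "") ""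
    let hook := if beat = "HOOK" ∧ st.1 = "" then scr else st.1
    let prob := if beat = "PROBLEM" ∧ st.2 = "" then scr else st.2
    (hook, prob)) ("", "")
  let chunks := [st.1, st.2, pvSafeStr offer ""].filter (fun c => c ≠ "")
  PySem.Str.strip (PySem.Str.join " " chunks)

-- ===== PORT B =====
-- first non-empty (stripped) script among blocks whose beat is beatName (= next(generator, ""))
def pvFirstScript (structure_ : List (List (String × String))) (beatName : String) : String :=
  (structure_.findSome? (fun b =>
    if PySem.Str.upper (pvSafeStr ((PySem.Dict.mk b).getD "beat" "") "") = beatName then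
      let s := pvSafeStr ((PySem.Dict.mk b).getD "script" "") ""
      if s ≠ "" then some s else none
    else none)).getD ""

def build_primary_text_py_alt (structure_ : List (List (String × String))) (offer : String) : String :=
  let hook := pvFirstScript structure_ "HOOK"
  let prob := pvFirstScript structure_ "PROBLEM"
  let chunks := [hook, prob, pvSafeStr offer ""].filter (fun c => c ≠ "")
  PySem.Str.strip (PySem.Str.join " " chunks)

-- ===== PRECONDITION & SPEC =====
def Spec_build_primary_text_py (structure_ : List (List (String × String))) (offer : String) (out : String) : Prop := out = build_primary_text_py_alt structure_ offer
instance (structure_ : List (List (String × String))) (offer : String) (out : String) : Decidable (Spec_build_primary_text_py structure_ offer out) := by unfold Spec_build_primary_text_py; infer_instance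

-- ===== CLAIM (what is proved, stated in full; the proofs are below) =====
def Claim_equal_build_primary_text_py : Prop := ∀ (structure_ : List (List (String × String))) (offer : String), Dom_build_primary_text_py structure_ offer → Spec_build_primary_text_py structure_ offer (build_primary_text_py structure_ offer)

-- ===== LEMMAS AND PROOFS =====

lemma pvFirstScript_cons (b : List (String × String)) (t : List (List (String × String))) (nm : String) :
    pvFirstScript (b :: t) nm =
      if PySem.Str.upper (pvSafeStr ((PySem.Dict.mk b).getD "beat" "") "") = nm
         ∧ pvSafeStr ((PySem.Dict.mk b).getD "script" "") "" ≠ "" then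
        pvSafeStr ((PySem.Dict.mk b).getD "script" "") ""
      else pvFirstScript t nm := by
  by_cases h1 : PySem.Str.upper (pvSafeStr ((PySem.Dict.mk b).getD "beat" "") "") = nm
  · by_cases h2 : pvSafeStr ((PySem.Dict.mk b).getD "script" "") "" = "" <;>
      simp [pvFirstScript, h1, h2]
  · simp [pvFirstScript, h1]

-- A's fold, from an arbitrary accumulator, in terms of B's two first-match scans
lemma pvFold_eq (l : List (List (String × String))) (h p : String) :
    l.foldl (fun (st : String × String) b =>
      let beat := PySem.Str.upper (pvSafeStr ((PySem.Dict.mk b).getD "beat" "") "")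
      let scr := pvSafeStr ((PySem.Dict.mk b).getD "script" "") ""
      let hook := if beat = "HOOK" ∧ st.1 = "" then scr else st.1
      let prob := if beat = "PROBLEM" ∧ st.2 = "" then scr else st.2
      (hook, prob)) (h, p)
    = (if h = "" then pvFirstScript l "HOOK" else h,
       if p = "" then pvFirstScript l "PROBLEM" else p) := by
  induction l generalizing h p with
  | nil => simp [pvFirstScript]
  | cons b t ih =>
    simp only [List.foldl_cons]
    rw [ih, pvFirstScript_cons, pvFirstScript_cons]
    by_cases hh : h = "" <;> by_cases hp : p = "" <;>
      by_cases hbh : PySem.Str.upper (pvSafeStr ((PySem.Dict.mk b).getD "beat" "") "") = "HOOK" <;>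
      by_cases hbp : PySem.Str.upper (pvSafeStr ((PySem.Dict.mk b).getD "beat" "") "") = "PROBLEM" <;>
      by_cases hs : pvSafeStr ((PySem.Dict.mk b).getD "script" "") "" = "" <;>
      simp [hh, hp, hbh, hbp, hs]

-- ===== VERDICT (by name: the statement is the Claim_ definition above) =====
theorem build_primary_text_py_spec : Claim_equal_build_primary_text_py := by
  intro structure_ offer _
  unfold Spec_build_primary_text_py build_primary_text_py build_primary_text_py_alt
  simp only [pvFold_eq]
  simp
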